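-- pv_equiv track=rewrite | github.com/sandialabs/LoQS | docs_scripts/gen_ref_pages.py | _split_numpy_doc_sections
-- ===== SOURCE A (Python) =====
-- import textwrap
--
-- _SECTION_NAMES = {
--     "parameters",
--     "returns",
--     "yields",
--     "raises",
--     "notes",
--     "examples",
--     "see also",
--     "references",
--     "warnings",
--     "attributes",
--     "methods",
-- }
--
-- def _is_numpy_section_header(lines: list[str], i: int) -> bool:
--     if i + 1 >= len(lines):
--         return False
--     title = lines[i].strip()
--     underline = lines[i + 1].strip()
--     return bool(title) and title.lower() in _SECTION_NAMES and len(underline) >= 3 and set(underline) == {"-"}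
--
-- def _split_numpy_doc_sections(doc: str) -> tuple[list[str], dict[str, list[str]]]:
--     """
--     Split a NumPy-style docstring into a leading prose block and named sections.
--
--     Returns ``(lead_lines, sections)``, where ``sections`` maps lowercased
--     section names to their raw lines.
--     """
--     text = textwrap.dedent(doc or "").strip("\n")
--     if not text:
--         return [], {}
--
--     lines = text.splitlines()
--     lead: list[str] = []
--     sections: dict[str, list[str]] = {}
--
--     i = 0
--     while i < len(lines) and not _is_numpy_section_header(lines, i):
--         lead.append(lines[i])
--         i += 1
--
--     while i < len(lines):
--         if not _is_numpy_section_header(lines, i):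
--             i += 1
--             continue
--
--         name = lines[i].strip().lower()
--         i += 2
--
--         body: list[str] = []
--         while i < len(lines) and not _is_numpy_section_header(lines, i):
--             body.append(lines[i])
--             i += 1
--         sections[name] = body
--
--     return lead, sections
-- ===== SOURCE B (Python) =====
-- import textwrap
--
-- _SECTION_NAMES = {
--     "parameters",
--     "returns",
--     "yields",
--     "raises",
--     "notes",
--     "examples",
--     "see also",
--     "references",
--     "warnings",
--     "attributes",
--     "methods",
-- }
--
-- def _is_header_pair(title: str, under: str) -> bool:
--     t = title.strip()
--     u = under.strip()
--     return bool(t) and t.lower() in _SECTION_NAMES and len(u) >= 3 and all(c == "-" for c in u)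
--
-- def _split_numpy_doc_sections(doc: str) -> tuple[list[str], dict[str, list[str]]]:
--     """Backward single-pass variant: scan the lines from the END, keeping a
--     'pending' block of lines; whenever the current line together with the line
--     below it forms a section header, the pending block (minus its underline
--     head) is that section's body.  What remains pending at the top is the lead."""
--     text = textwrap.dedent(doc or "").strip("\n")
--     if not text:
--         return [], {}
--
--     lines = text.splitlines()
--     pending: list[str] = []
--     secs_rev: list[tuple[str, list[str]]] = []
--     below: str | None = None
--     for line in reversed(lines):
--         if below is not None and _is_header_pair(line, below):
--             secs_rev.append((line.strip().lower(), pending[1:]))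
--             pending = []
--         else:
--             pending = [line] + pending
--         below = line
--     return pending, dict(reversed(secs_rev))
-- ===== Notes on version B (the rewrite author's own statement) =====
-- stated objective: alternative
-- what changed: Replaces A's forward stateful index walk (nested while loops advancing one cursor with i += 2 skips) with a single backward pass over the lines that keeps a pending block and a one-line lookback, closing the pending block into a section whenever the current line plus the line below it form a header; the lead is what remains pending.
import Mathlib
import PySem

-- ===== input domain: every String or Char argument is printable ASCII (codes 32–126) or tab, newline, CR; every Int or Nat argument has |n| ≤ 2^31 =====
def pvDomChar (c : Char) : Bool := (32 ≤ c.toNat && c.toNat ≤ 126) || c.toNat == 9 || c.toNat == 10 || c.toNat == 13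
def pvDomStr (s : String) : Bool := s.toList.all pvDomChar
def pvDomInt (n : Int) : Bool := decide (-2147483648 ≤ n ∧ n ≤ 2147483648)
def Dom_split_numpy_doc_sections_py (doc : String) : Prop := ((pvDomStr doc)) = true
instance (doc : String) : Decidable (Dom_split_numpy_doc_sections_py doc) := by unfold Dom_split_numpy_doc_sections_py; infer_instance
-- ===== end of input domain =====

-- B replaces A's forward two-cursor index walk with a single BACKWARD pass over the
-- lines that keeps a pending block and closes it into a section whenever the current
-- line plus the one below it form a header; same cost, different traversal.

-- ===== PORT A =====
-- (helpers port the module context A uses: textwrap.dedent, str.strip("\n"),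
-- _SECTION_NAMES and _is_numpy_section_header)

-- ' ' or '\t' (the characters textwrap.dedent treats as indentation)
def pvWs (c : Char) : Bool := c == ' ' || c == '\t'

-- the inner `for i, (x, y) in enumerate(zip(margin, indent)): if x != y: margin = margin[:i]; break`
-- (no break ⇒ margin unchanged)
def pvCommonPrefixElse : List Char → List Char → List Char
  | [], _ => []
  | m, [] => m
  | x :: ms, y :: is => if x = y then x :: pvCommonPrefixElse ms is else []

-- one step of dedent's margin loop (margin already set)
def pvMarginUpd (m ind : List Char) : List Char :=
  if m.isPrefixOf ind then m
  else if ind.isPrefixOf m then ind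
  else pvCommonPrefixElse m ind

-- textwrap.dedent (CPython 3.11), exact on the '\n'-segments of the text:
-- (1) _whitespace_only_re.sub('', text): a nonempty all-[ \t] segment becomes '';
-- (2) indents = leading [ \t]* of every segment containing a char outside [ \t];
-- (3) the margin fold; (4) re.sub('(?m)^'+margin, ''): drop margin where it prefixes a segment.
def pvDedent (t : List Char) : List Char :=
  let segs := (PySem.Chars.splitOn t ['\n']).map
    (fun s => if s ≠ [] ∧ s.all pvWs then [] else s)
  let indents := segs.filterMap
    (fun s => if s.any (fun c => ¬ pvWs c) then some (s.takeWhile pvWs) else none)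
  let margin := indents.foldl
    (fun mo ind => match mo with
      | none => some ind
      | some m => some (pvMarginUpd m ind)) none
  match margin with
  | none => List.intercalate ['\n'] segs
  | some [] => List.intercalate ['\n'] segs
  | some m =>
      List.intercalate ['\n']
        (segs.map (fun s => if m.isPrefixOf s then s.drop m.length else s))

-- textwrap.dedent(doc or "").strip("\n")  (doc or "" = doc for a str argument: dedent("") = "")
def pvText (doc : String) : List Char :=
  PySem.Chars.stripChars (pvDedent doc.toList) ['\n']

-- _SECTION_NAMES, as lowercase char lists (set of distinct strings; membership = list membership)
def pvNames : List (List Char) :=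
  ["parameters".toList, "returns".toList, "yields".toList, "raises".toList,
   "notes".toList, "examples".toList, "see also".toList, "references".toList,
   "warnings".toList, "attributes".toList, "methods".toList]

-- _is_numpy_section_header(lines, i); set(underline) == {'-'} ⟺ underline nonempty and all
-- dashes, and nonemptiness is subsumed by the preceding len(underline) >= 3 check.
def pvIsHeader (lines : List String) (i : Nat) : Bool :=
  if i + 1 < lines.length then
    let title := PySem.Str.strip (lines.getD i "")
    let underline := PySem.Str.strip (lines.getD (i + 1) "")
    !title.toList.isEmpty && pvNames.contains (PySem.Str.lower title).toList &&
      decide (3 ≤ underline.toList.length) && underline.toList.all (· == '-')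
  else false

-- A's first/inner while loop: collect lines until a header (or the end); returns the
-- collected lines and the final cursor.
def pvAScan (lines : List String) (i : Nat) : List String × Nat :=
  if h : i < lines.length ∧ pvIsHeader lines i = false then
    let r := pvAScan lines (i + 1)
    (lines.getD i "" :: r.1, r.2)
  else ([], i)
termination_by lines.length - i
decreasing_by omega

theorem pvAScan_ge (lines : List String) (i : Nat) : i ≤ (pvAScan lines i).2 := by
  fun_induction pvAScan with
  | case1 i h r ih => exact le_trans (Nat.le_succ i) ih
  | case2 i h => simp

-- A's second while loop over the rest of the lines, carrying the sections dict.
def pvAOuter (lines : List String) (i : Nat)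
    (sections : PySem.Dict String (List String)) : PySem.Dict String (List String) :=
  if hlt : i < lines.length then
    if hh : pvIsHeader lines i = false then pvAOuter lines (i + 1) sections
    else
      let name := PySem.Str.lower (PySem.Str.strip (lines.getD i ""))
      let r := pvAScan lines (i + 2)
      pvAOuter lines r.2 (sections.insert name r.1)
  else sections
termination_by lines.length - i
decreasing_by
  · omega
  · have := pvAScan_ge lines (i + 2); omega

def split_numpy_doc_sections_py (doc : String) : List String × (List (String × List String)) :=
  let text := pvText doc
  if text.isEmpty then ([], [])
  else
    let lines := PySem.Str.splitlines (String.ofList text)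
    let r := pvAScan lines 0
    (r.1, (pvAOuter lines r.2 PySem.Dict.empty).items)

-- ===== PORT B =====
-- B's own port of textwrap.dedent (a library call Source B makes): longest common prefix
-- of the indents, computed with a plain lcp fold (Python's margin update IS the lcp).

def pvWsB (c : Char) : Bool := decide (c = ' ' ∨ c = '\t')

def pvLcp : List Char → List Char → List Char
  | x :: xs, y :: ys => if x = y then x :: pvLcp xs ys else []
  | _, _ => []

def pvDedentB (t : List Char) : List Char :=
  let segs := (PySem.Chars.splitOn t ['\n']).map (fun s => if s.all pvWsB then [] else s)
  let indents := (segs.filter (fun s => !s.all pvWsB)).map (fun s => s.takeWhile pvWsB)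
  let segs' :=
    match indents with
    | [] => segs
    | i0 :: rest =>
        let m := rest.foldl pvLcp i0
        if m.isEmpty then segs
        else segs.map (fun s => if m.isPrefixOf s then s.drop m.length else s)
  List.intercalate ['\n'] segs'

def pvTextB (doc : String) : List Char :=
  PySem.Chars.stripChars (pvDedentB doc.toList) ['\n']

-- Source B's _SECTION_NAMES, kept as strings
def pvNamesB : List String :=
  ["parameters", "returns", "yields", "raises", "notes", "examples",
   "see also", "references", "warnings", "attributes", "methods"]

-- Source B's _is_header_pair(title, under)
def pvHdrPair (title under : String) : Bool :=
  let t := PySem.Str.strip title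
  let u := PySem.Str.strip under
  decide (t.toList ≠ []) && pvNamesB.contains (PySem.Str.lower t) &&
    decide (3 ≤ u.toList.length) && decide (∀ c ∈ u.toList, c = '-')

-- one iteration of Source B's `for line in reversed(lines)` loop;
-- state = (pending, secs in forward order, the line below the current one)
def pvBStep (st : List String × List (String × List String) × Option String)
    (line : String) : List String × List (String × List String) × Option String :=
  match st with
  | (pending, secs, below) =>
    match below with
    | some u =>
        if pvHdrPair line u then
          ([], (PySem.Str.lower (PySem.Str.strip line), pending.tail) :: secs, some line)
        else (line :: pending, secs, some line)
    | none => (line :: pending, secs, some line)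

def split_numpy_doc_sections_py_alt (doc : String) : List String × (List (String × List String)) :=
  let text := pvTextB doc
  if text.isEmpty then ([], [])
  else
    let lines := PySem.Str.splitlines (String.ofList text)
    let st := lines.reverse.foldl pvBStep ([], [], none)
    (st.1, (st.2.1.foldl (fun d kv => d.insert kv.1 kv.2)
      (PySem.Dict.empty : PySem.Dict String (List String))).items)

-- ===== PRECONDITION & SPEC =====
def Spec_split_numpy_doc_sections_py (doc : String) (out : List String × (List (String × List String))) : Prop := out = split_numpy_doc_sections_py_alt doc
instance (doc : String) (out : List String × (List (String × List String))) : Decidable (Spec_split_numpy_doc_sections_py doc out) := by unfold Spec_split_numpy_doc_sections_py; infer_instance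

-- ===== CLAIM (what is proved, stated in full; the proofs are below) =====
def Claim_equal_split_numpy_doc_sections_py : Prop := ∀ (doc : String), Dom_split_numpy_doc_sections_py doc → Spec_split_numpy_doc_sections_py doc (split_numpy_doc_sections_py doc)

-- ===== LEMMAS AND PROOFS =====

-- ---- dedent equality: pvDedentB = pvDedent ----

theorem pvWsB_eq : pvWsB = pvWs := by
  funext c; simp [pvWsB, pvWs]; tauto

theorem pvLcp_of_prefix : ∀ {m i : List Char}, m.isPrefixOf i = true → pvLcp m i = m := by
  intro m
  induction m with
  | nil => intro i _; cases i <;> rfl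
  | cons x ms ih =>
    intro i h
    cases i with
    | nil => simp [List.isPrefixOf] at h
    | cons y is =>
      rw [List.isPrefixOf_cons₂] at h
      simp only [Bool.and_eq_true, beq_iff_eq] at h
      simp [pvLcp, h.1, ih h.2]

theorem pvLcp_of_prefix' : ∀ {m i : List Char}, i.isPrefixOf m = true → pvLcp m i = i := by
  intro m
  induction m with
  | nil => intro i h; cases i with
    | nil => rfl
    | cons y is => simp [List.isPrefixOf] at h
  | cons x ms ih =>
    intro i h
    cases i with
    | nil => rfl
    | cons y is =>
      rw [List.isPrefixOf_cons₂] at h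
      simp only [Bool.and_eq_true, beq_iff_eq] at h
      simp [pvLcp, h.1.symm, ih h.2]

theorem pvCommonPrefixElse_eq : ∀ {m i : List Char}, i.isPrefixOf m = false →
    pvCommonPrefixElse m i = pvLcp m i := by
  intro m
  induction m with
  | nil => intro i h; cases i <;> rfl
  | cons x ms ih =>
    intro i h
    cases i with
    | nil => simp [List.isPrefixOf] at h
    | cons y is =>
      rw [List.isPrefixOf_cons₂] at h
      by_cases hxy : x = y
      · subst hxy
        simp only [BEq.rfl, Bool.true_and] at h
        simp [pvCommonPrefixElse, pvLcp, ih h]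
      · simp [pvCommonPrefixElse, pvLcp, hxy, Ne.symm hxy]

theorem pvMarginUpd_eq : pvMarginUpd = pvLcp := by
  funext m i
  unfold pvMarginUpd
  by_cases h1 : m.isPrefixOf i = true
  · rw [if_pos h1, pvLcp_of_prefix h1]
  · rw [if_neg h1]
    by_cases h2 : i.isPrefixOf m = true
    · rw [if_pos h2, pvLcp_of_prefix' h2]
    · rw [if_neg h2, pvCommonPrefixElse_eq (Bool.eq_false_iff.mpr h2)]

theorem pvOptFold (f : List Char → List Char → List Char) (l : List (List Char)) :
    ∀ (m : List Char),
    l.foldl (fun mo ind => match mo with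
      | none => some ind
      | some m => some (f m ind)) (some m) = some (l.foldl f m) := by
  induction l with
  | nil => intro m; rfl
  | cons a t ih => intro m; simpa using ih (f m a)

theorem pvFilterMap_eq {α β : Type} (p : α → Bool) (f : α → β) (l : List α) :
    l.filterMap (fun s => if p s then some (f s) else none) = (l.filter p).map f := by
  induction l with
  | nil => rfl
  | cons a t ih =>
    by_cases h : p a = true
    · simp [List.filterMap_cons, List.filter_cons, h, ih]
    · simp [List.filterMap_cons, List.filter_cons, h, ih]

theorem pvAnyNot (s : List Char) : (s.any fun c => ¬ pvWs c) = !s.all pvWs := by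
  simp only [List.all_eq_not_any_not]
  simp

theorem pvSegEq (s : List Char) :
    (if s.all pvWs then ([] : List Char) else s) = (if s ≠ [] ∧ s.all pvWs then [] else s) := by
  cases s <;> simp

theorem pvMarginMatch (segs indents : List (List Char)) :
    (List.intercalate ['\n'] (match indents with
      | [] => segs
      | i0 :: rest =>
          let m := rest.foldl pvLcp i0
          if m.isEmpty then segs
          else segs.map (fun s => if m.isPrefixOf s then s.drop m.length else s)))
    = (match indents.foldl (fun mo ind => match mo with
        | none => some ind
        | some m => some (pvLcp m ind)) none with
      | none => List.intercalate ['\n'] segs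
      | some [] => List.intercalate ['\n'] segs
      | some m => List.intercalate ['\n']
          (segs.map (fun s => if m.isPrefixOf s then s.drop m.length else s))) := by
  cases indents with
  | nil => rfl
  | cons i0 rest =>
    simp only [List.foldl_cons]
    rw [pvOptFold]
    cases hm : rest.foldl pvLcp i0 with
    | nil => simp
    | cons c cs => simp

theorem pvDedentB_eq (t : List Char) : pvDedentB t = pvDedent t := by
  unfold pvDedentB pvDedent
  simp only [pvWsB_eq, pvMarginUpd_eq, pvSegEq, pvAnyNot, ← pvFilterMap_eq]
  exact pvMarginMatch _ _

theorem pvTextB_eq (doc : String) : pvTextB doc = pvText doc := by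
  unfold pvTextB pvText
  rw [pvDedentB_eq]

-- ---- header equality: pvHdrPair on adjacent lines = pvIsHeader ----

theorem pvNamesB_eq (s : String) : pvNamesB.contains s = pvNames.contains s.toList := by
  rw [Bool.eq_iff_iff, List.contains_iff_mem, List.contains_iff_mem]
  have h : pvNames = pvNamesB.map String.toList := rfl
  rw [h]
  exact (List.mem_map_of_injective (fun a b hab => String.toList_inj.mp hab)).symm

theorem pvAllDash_eq (l : List Char) : decide (∀ c ∈ l, c = '-') = l.all (· == '-') := by
  rw [Bool.eq_iff_iff]
  simp [List.all_eq_true]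

theorem pvNonempty_eq (l : List Char) : decide (l ≠ []) = !l.isEmpty := by
  cases l <;> simp

theorem pvIsHeader_eq_pair (L : List String) (i : Nat) (h : i + 1 < L.length) :
    pvIsHeader L i = pvHdrPair (L.getD i "") (L.getD (i + 1) "") := by
  unfold pvIsHeader pvHdrPair
  rw [if_pos h]
  simp only
  rw [pvNamesB_eq, pvAllDash_eq, pvNonempty_eq]

-- ---- A-side index characterisation (header table pvHdrs, next header pvNxt) ----

def pvHdrs (L : List String) : List Nat := (List.range L.length).filter (fun j => pvIsHeader L j)
def pvHsf (L : List String) (i : Nat) : List Nat := (pvHdrs L).filter (fun j => i ≤ j)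
def pvNxt (L : List String) (i : Nat) : Nat := (pvHsf L i).headD L.length

-- the forward-order section list both dicts are built from
def pvPairs (L : List String) : List Nat → List (String × List String)
  | [] => []
  | h :: rest =>
      (PySem.Str.lower (PySem.Str.strip (L.getD h "")),
        (L.drop (h + 2)).take (rest.headD L.length - (h + 2))) :: pvPairs L rest

theorem pvMem_hdrs {L : List String} {j : Nat} :
    j ∈ pvHdrs L ↔ j < L.length ∧ pvIsHeader L j = true := by
  simp [pvHdrs, List.mem_filter, List.mem_range]

theorem pvHdrs_sorted (L : List String) : (pvHdrs L).Pairwise (· < ·) :=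
  (List.pairwise_lt_range).filter _

theorem pvHsf_congr {L : List String} {i j : Nat} (hij : i ≤ j)
    (h : ∀ x ∈ pvHdrs L, i ≤ x → j ≤ x) : pvHsf L i = pvHsf L j := by
  unfold pvHsf
  refine List.filter_congr (fun x hx => ?_)
  by_cases hle : i ≤ x
  · simp [hle, h x hx hle]
  · have : ¬ j ≤ x := by omega
    simp [hle, this]

theorem pvHsf_step {L : List String} {i : Nat} (h : i ∉ pvHdrs L) :
    pvHsf L i = pvHsf L (i + 1) := by
  refine pvHsf_congr (by omega) (fun x hx hix => ?_)
  rcases Nat.eq_or_lt_of_le hix with rfl | hlt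
  · exact absurd hx h
  · omega

-- generic: on a strictly sorted list, filtering (i ≤ ·) with i a member peels off i
theorem pvFilter_le_cons {l : List Nat} (hs : l.Pairwise (· < ·)) {i : Nat} (hm : i ∈ l) :
    l.filter (fun j => i ≤ j) = i :: l.filter (fun j => i + 1 ≤ j) := by
  induction l with
  | nil => cases hm
  | cons a t ih =>
    rcases List.pairwise_cons.mp hs with ⟨hlt, ht⟩
    rcases List.mem_cons.mp hm with rfl | hmt
    · have h1 : t.filter (fun j => decide (i ≤ j)) = t.filter (fun j => decide (i + 1 ≤ j)) :=
        List.filter_congr (fun x hx => by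
          have := hlt x hx; simp only [decide_eq_decide]; omega)
      have e1 : (i :: t).filter (fun j => decide (i ≤ j)) = i :: t.filter (fun j => decide (i ≤ j)) := by
        rw [List.filter_cons_of_pos (by simp)]
      have e2 : (i :: t).filter (fun j => decide (i + 1 ≤ j)) = t.filter (fun j => decide (i + 1 ≤ j)) := by
        rw [List.filter_cons_of_neg (by simp)]
      rw [e1, e2, h1]
    · have hhi : a < i := hlt i hmt
      have e1 : (a :: t).filter (fun j => decide (i ≤ j)) = t.filter (fun j => decide (i ≤ j)) := by
        rw [List.filter_cons_of_neg (by simp; omega)]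
      have e2 : (a :: t).filter (fun j => decide (i + 1 ≤ j)) = t.filter (fun j => decide (i + 1 ≤ j)) := by
        rw [List.filter_cons_of_neg (by simp; omega)]
      rw [e1, e2, ih ht hmt]

theorem pvHsf_cons {L : List String} {i : Nat} (h : i ∈ pvHdrs L) :
    pvHsf L i = i :: pvHsf L (i + 1) := by
  unfold pvHsf
  simpa using pvFilter_le_cons (pvHdrs_sorted L) h

-- an all-dash string is no section name
theorem pvAllDashNotName {t : List Char} (h1 : t.all (· == '-') = true) :
    pvNames.contains t = false := by
  cases hc : pvNames.contains t
  · rfl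
  · exfalso
    have hm : t ∈ pvNames := List.contains_iff_mem.mp hc
    simp only [pvNames, List.mem_cons, List.not_mem_nil, or_false] at hm
    rcases hm with rfl|rfl|rfl|rfl|rfl|rfl|rfl|rfl|rfl|rfl|rfl <;> simp_all

theorem pvLower_all_dash {l : List Char} (h : l.all (· == '-') = true) :
    PySem.Chars.lower l = l := by
  simp only [PySem.Chars.lower]
  conv_rhs => rw [← List.map_id l]
  refine List.map_congr_left (fun x hx => ?_)
  have : x = '-' := by simpa using List.all_eq_true.mp h x hx
  subst this; decide

theorem pvIsHeader_lt {L : List String} {i : Nat} (h : pvIsHeader L i = true) :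
    i + 1 < L.length := by
  by_contra hc
  simp [pvIsHeader, hc] at h

-- no two adjacent headers: the line under a header is all dashes, never a section name
theorem pvNoAdj {L : List String} {i : Nat} (h : pvIsHeader L i = true) :
    pvIsHeader L (i + 1) = false := by
  have hlt := pvIsHeader_lt h
  unfold pvIsHeader at h ⊢
  rw [if_pos hlt] at h
  simp only [Bool.and_eq_true, decide_eq_true_eq] at h
  split
  · have hdash : (PySem.Str.strip (L.getD (i + 1) "")).toList.all (· == '-') = true := h.2
    have : pvNames.contains (PySem.Str.lower (PySem.Str.strip (L.getD (i + 1) ""))).toList = false := by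
      rw [PySem.Str.toList_lower, pvLower_all_dash hdash]
      exact pvAllDashNotName hdash
    simp only [this, Bool.and_false, Bool.false_and]
  · rfl

theorem pvHsf_nil {L : List String} {i : Nat} (h : L.length ≤ i) : pvHsf L i = [] := by
  unfold pvHsf
  refine List.filter_eq_nil_iff.mpr (fun x hx => ?_)
  have := (pvMem_hdrs.mp hx).1
  simp; omega

theorem pvMem_hsf {L : List String} {i x : Nat} (hx : x ∈ pvHsf L i) :
    x ∈ pvHdrs L ∧ i ≤ x := by
  have := List.mem_filter.mp hx
  exact ⟨this.1, by simpa using this.2⟩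

theorem pvNxt_le {L : List String} (i : Nat) : pvNxt L i ≤ L.length := by
  unfold pvNxt
  cases hfs : pvHsf L i with
  | nil => simp
  | cons a t =>
    have ha : a ∈ pvHsf L i := by rw [hfs]; exact List.mem_cons_self
    have := (pvMem_hdrs.mp (pvMem_hsf ha).1).1
    simpa using by omega

theorem pvNxt_ge {L : List String} {i : Nat} (h : i ≤ L.length) : i ≤ pvNxt L i := by
  unfold pvNxt
  cases hfs : pvHsf L i with
  | nil => simpa using h
  | cons a t =>
    have ha : a ∈ pvHsf L i := by rw [hfs]; exact List.mem_cons_self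
    simpa using (pvMem_hsf ha).2

theorem pvHsf_zero (L : List String) : pvHsf L 0 = pvHdrs L := by
  unfold pvHsf
  exact List.filter_eq_self.mpr (fun x _ => by simp)

theorem pvHsf_nxt {L : List String} (i : Nat) :
    pvHsf L (pvNxt L i) = pvHsf L i := by
  unfold pvNxt
  cases hfs : pvHsf L i with
  | nil => simp only [List.headD_nil]; exact pvHsf_nil (le_refl _)
  | cons a t =>
    simp only [List.headD_cons]
    have hsorted : (pvHsf L i).Pairwise (· < ·) := (pvHdrs_sorted L).filter _
    have ha : a ∈ pvHsf L i := by rw [hfs]; exact List.mem_cons_self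
    rw [← hfs]
    refine (pvHsf_congr (pvMem_hsf ha).2 (fun x hx hix => ?_)).symm
    have hxm : x ∈ pvHsf L i := List.mem_filter.mpr ⟨hx, by simpa using hix⟩
    rw [hfs] at hxm hsorted
    rcases List.mem_cons.mp hxm with rfl | hxt
    · exact le_refl _
    · exact le_of_lt ((List.pairwise_cons.mp hsorted).1 x hxt)

theorem pvAScan_eq {L : List String} : ∀ {i : Nat}, i ≤ L.length →
    pvAScan L i = ((L.drop i).take (pvNxt L i - i), pvNxt L i) := by
  suffices h : ∀ k i, L.length - i ≤ k → i ≤ L.length →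
      pvAScan L i = ((L.drop i).take (pvNxt L i - i), pvNxt L i) by
    intro i hi; exact h (L.length - i) i (le_refl _) hi
  intro k
  induction k with
  | zero =>
    intro i hk hi
    have hieq : i = L.length := by omega
    subst hieq
    rw [pvAScan]
    have hnil : pvHsf L L.length = [] := pvHsf_nil (le_refl _)
    have : pvNxt L L.length = L.length := by unfold pvNxt; rw [hnil]; rfl
    simp [this]
  | succ k ih =>
    intro i hk hi
    by_cases hcond : i < L.length ∧ pvIsHeader L i = false
    · rw [pvAScan]
      rw [dif_pos hcond]
      have hih := ih (i + 1) (by omega) (by omega)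
      have hnm : i ∉ pvHdrs L := fun hm => by
        have := (pvMem_hdrs.mp hm).2; rw [hcond.2] at this; cases this
      have hstep : pvHsf L i = pvHsf L (i + 1) := pvHsf_step hnm
      have hnxt : pvNxt L i = pvNxt L (i + 1) := by unfold pvNxt; rw [hstep]
      have hge : i + 1 ≤ pvNxt L (i + 1) := pvNxt_ge (by omega)
      rw [hih, hnxt]
      refine Prod.ext ?_ rfl
      simp only
      rw [List.drop_eq_getElem_cons hcond.1, List.getD_eq_getElem L "" hcond.1]
      have : pvNxt L (i + 1) - i = (pvNxt L (i + 1) - (i + 1)) + 1 := by omega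
      rw [this, List.take_succ_cons]
    · rw [pvAScan, dif_neg hcond]
      rcases Nat.lt_or_ge i L.length with hlt | hge
      · have hh : pvIsHeader L i = true := by
          cases hI : pvIsHeader L i
          · exact absurd ⟨hlt, hI⟩ hcond
          · rfl
        have hcons : pvHsf L i = i :: pvHsf L (i + 1) :=
          pvHsf_cons (pvMem_hdrs.mpr ⟨hlt, hh⟩)
        have : pvNxt L i = i := by unfold pvNxt; rw [hcons]; rfl
        simp [this]
      · have hieq : i = L.length := by omega
        subst hieq
        have hnil : pvHsf L L.length = [] := pvHsf_nil (le_refl _)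
        have : pvNxt L L.length = L.length := by unfold pvNxt; rw [hnil]; rfl
        simp [this]

theorem pvAOuter_eq {L : List String} : ∀ {i : Nat}, i ≤ L.length →
    ∀ (d : PySem.Dict String (List String)),
      pvAOuter L i d = (pvPairs L (pvHsf L i)).foldl (fun d kv => d.insert kv.1 kv.2) d := by
  suffices h : ∀ k i, L.length - i ≤ k → i ≤ L.length → ∀ d,
      pvAOuter L i d = (pvPairs L (pvHsf L i)).foldl (fun d kv => d.insert kv.1 kv.2) d by
    intro i hi d; exact h (L.length - i) i (le_refl _) hi d
  intro k
  induction k with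
  | zero =>
    intro i hk hi d
    have hieq : i = L.length := by omega
    subst hieq
    rw [pvAOuter, dif_neg (by omega), pvHsf_nil (le_refl _)]
    rfl
  | succ k ih =>
    intro i hk hi d
    rcases Nat.lt_or_ge i L.length with hlt | hge
    · cases hI : pvIsHeader L i with
      | false =>
        rw [pvAOuter, dif_pos hlt, dif_pos hI]
        have hnm : i ∉ pvHdrs L := fun hm => by
          have := (pvMem_hdrs.mp hm).2; rw [hI] at this; cases this
        rw [pvHsf_step hnm]
        exact ih (i + 1) (by omega) (by omega) d
      | true =>
        have ht : pvIsHeader L i = true := hI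
        rw [pvAOuter, dif_pos hlt, dif_neg (show ¬ pvIsHeader L i = false by simp [ht])]
        have h2 : i + 1 < L.length := pvIsHeader_lt ht
        have hscan := pvAScan_eq (L := L) (i := i + 2) (by omega)
        have hcons : pvHsf L i = i :: pvHsf L (i + 1) :=
          pvHsf_cons (pvMem_hdrs.mpr ⟨hlt, ht⟩)
        have hadj : pvHsf L (i + 1) = pvHsf L (i + 2) := by
          refine pvHsf_step (fun hm => ?_)
          have := (pvMem_hdrs.mp hm).2
          rw [pvNoAdj ht] at this; cases this
        have hge2 : i + 2 ≤ pvNxt L (i + 2) := pvNxt_ge (by omega)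
        have hle2 : pvNxt L (i + 2) ≤ L.length := pvNxt_le _
        rw [hcons, hadj]
        simp only [hscan]
        have hih := ih (pvNxt L (i + 2)) (by omega) hle2
        rw [hih, pvHsf_nxt _]
        simp only [pvPairs, List.foldl_cons]
        rfl
    · have hieq : i = L.length := by omega
      subst hieq
      rw [pvAOuter, dif_neg (by omega), pvHsf_nil (le_refl _)]
      rfl

-- ---- B-side: the backward fold computes the same lead and pair list ----

-- forward structural spec of B's backward fold (pending = lead, secs forward)
def pvG : List String → List String × List (String × List String)
  | [] => ([], [])
  | x :: t =>
      match t with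
      | [] => ([x], [])
      | y :: _ =>
          if pvHdrPair x y then
            ([], (PySem.Str.lower (PySem.Str.strip x), (pvG t).1.tail) :: (pvG t).2)
          else (x :: (pvG t).1, (pvG t).2)

theorem pvFold_eq (L : List String) :
    L.reverse.foldl pvBStep ([], [], none) = ((pvG L).1, (pvG L).2, L.head?) := by
  rw [List.foldl_reverse]
  induction L with
  | nil => simp [pvG]
  | cons x t ih =>
    rw [List.foldr_cons, ih]
    cases t with
    | nil => simp [pvBStep, pvG]
    | cons y t' =>
      by_cases h : pvHdrPair x y = true
      · simp [pvBStep, pvG, h]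
      · simp only [Bool.not_eq_true] at h
        simp [pvBStep, pvG, h]

theorem pvIsHeader_cons_succ (x : String) (t : List String) (j : Nat) :
    pvIsHeader (x :: t) (j + 1) = pvIsHeader t j := by
  unfold pvIsHeader
  by_cases h : j + 1 < t.length
  · rw [if_pos (by simp; omega), if_pos h]
    simp [List.getD_cons_succ]
  · rw [if_neg (by simp; omega), if_neg h]

theorem pvHdrs_cons (x : String) (t : List String) :
    pvHdrs (x :: t) = (if pvIsHeader (x :: t) 0 then [0] else []) ++ (pvHdrs t).map (· + 1) := by
  unfold pvHdrs
  have hr : List.range (x :: t).length = 0 :: (List.range t.length).map (· + 1) := by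
    simp [List.range_succ_eq_map]
  rw [hr, List.filter_cons]
  have hm : ((List.range t.length).map (· + 1)).filter (fun j => pvIsHeader (x :: t) j)
      = ((List.range t.length).filter (fun j => pvIsHeader t j)).map (· + 1) := by
    rw [List.filter_map]
    congr 1
    refine List.filter_congr (fun j _ => ?_)
    simp [pvIsHeader_cons_succ]
  rw [hm]
  by_cases h : pvIsHeader (x :: t) 0 = true <;> simp [h]

theorem pvPairs_shift (x : String) (t : List String) :
    ∀ hs : List Nat, pvPairs (x :: t) (hs.map (· + 1)) = pvPairs t hs := by
  intro hs
  induction hs with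
  | nil => rfl
  | cons h rest ih =>
    simp only [List.map_cons, pvPairs, ih]
    have e2 : (x :: t).drop (h + 1 + 2) = t.drop (h + 2) := by
      rw [show h + 1 + 2 = (h + 2) + 1 from rfl, List.drop_succ_cons]
    have e3 : ((rest.map (· + 1)).headD (x :: t).length) - (h + 1 + 2)
        = rest.headD t.length - (h + 2) := by
      cases rest with
      | nil => simp only [List.map_nil, List.headD_nil, List.length_cons]; omega
      | cons r rs => simp only [List.map_cons, List.headD_cons]; omega
    rw [e2, e3]
    simp [List.getD_cons_succ]

theorem pvHeadD_map_succ (l : List Nat) (n : Nat) :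
    (l.map (· + 1)).headD (n + 1) = l.headD n + 1 := by
  cases l <;> simp

theorem pvG_cons₂ (x y : String) (t : List String) :
    pvG (x :: y :: t) = if pvHdrPair x y then
        ([], (PySem.Str.lower (PySem.Str.strip x), (pvG (y :: t)).1.tail) :: (pvG (y :: t)).2)
      else (x :: (pvG (y :: t)).1, (pvG (y :: t)).2) := rfl

theorem pvTailTake (y : String) (t' : List String) (n : Nat) :
    (List.take n (y :: t')).tail = List.take (n - 1) t' := by
  cases n <;> simp

theorem pvG_eq (L : List String) :
    pvG L = (L.take ((pvHdrs L).headD L.length), pvPairs L (pvHdrs L)) := by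
  induction L with
  | nil => simp [pvG, pvHdrs, pvPairs]
  | cons x t ih =>
    by_cases h0 : pvIsHeader (x :: t) 0 = true
    · -- header at the front
      have h1 : 1 < (x :: t).length := pvIsHeader_lt h0
      obtain ⟨y, t', rfl⟩ : ∃ y t', t = y :: t' := by
        cases t with
        | nil => simp at h1
        | cons y t' => exact ⟨y, t', rfl⟩
      have hp : pvHdrPair x y = true := by
        have := pvIsHeader_eq_pair (x :: y :: t') 0 (by simpa using h1)
        rw [this] at h0
        simpa using h0
      have hcons := pvHdrs_cons x (y :: t')
      rw [if_pos h0] at hcons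
      have hnT1 : ((pvHdrs (y :: t')).map (· + 1)).headD ((x :: y :: t').length)
          = (pvHdrs (y :: t')).headD ((y :: t').length) + 1 := by
        rw [show (x :: y :: t').length = (y :: t').length + 1 from rfl, pvHeadD_map_succ]
      have hG : pvG (x :: y :: t')
          = ([], (PySem.Str.lower (PySem.Str.strip x),
              (List.take ((pvHdrs (y :: t')).headD ((y :: t').length)) (y :: t')).tail)
                :: pvPairs (y :: t') (pvHdrs (y :: t'))) := by
        rw [pvG_cons₂, if_pos hp, ih]
      have hRhead : (pvHdrs (x :: y :: t')).headD ((x :: y :: t').length) = 0 := by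
        rw [hcons]; rfl
      have hP : pvPairs (x :: y :: t') (pvHdrs (x :: y :: t'))
          = (PySem.Str.lower (PySem.Str.strip x),
              List.take ((pvHdrs (y :: t')).headD ((y :: t').length) - 1) t')
                :: pvPairs (y :: t') (pvHdrs (y :: t')) := by
        rw [hcons]
        show pvPairs (x :: y :: t') (0 :: (pvHdrs (y :: t')).map (· + 1)) = _
        simp only [pvPairs]
        rw [pvPairs_shift]
        have e2 : ((x :: y :: t').drop (0 + 2)).take
              (((pvHdrs (y :: t')).map (· + 1)).headD ((x :: y :: t').length) - (0 + 2))
            = List.take ((pvHdrs (y :: t')).headD ((y :: t').length) - 1) t' := by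
          rw [hnT1]
          have e4 : (pvHdrs (y :: t')).headD ((y :: t').length) + 1 - (0 + 2)
              = (pvHdrs (y :: t')).headD ((y :: t').length) - 1 := by omega
          rw [e4]
          rfl
        rw [e2]
        rfl
      rw [hG, hRhead, hP, pvTailTake]
      rfl
    · -- no header at the front
      have h0' : pvIsHeader (x :: t) 0 = false := Bool.eq_false_iff.mpr h0
      have hcons := pvHdrs_cons x t
      rw [h0', if_neg (by simp)] at hcons
      cases t with
      | nil =>
        have hn : pvHdrs [x] = [] := by
          rw [hcons]
          simp [pvHdrs]
        simp [pvG, hn, pvPairs]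
      | cons y t' =>
        have hp : pvHdrPair x y = false := by
          have := pvIsHeader_eq_pair (x :: y :: t') 0 (by simp)
          rw [this] at h0'
          simpa using h0'
        have hnT1 : ((pvHdrs (y :: t')).map (· + 1)).headD ((x :: y :: t').length)
            = (pvHdrs (y :: t')).headD ((y :: t').length) + 1 := by
          rw [show (x :: y :: t').length = (y :: t').length + 1 from rfl, pvHeadD_map_succ]
        have hG : pvG (x :: y :: t') = (x :: (pvG (y :: t')).1, (pvG (y :: t')).2) := by
          rw [pvG_cons₂, if_neg (by simp [hp])]
        rw [hG, hcons]
        simp only [List.nil_append]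
        rw [pvPairs_shift, hnT1, List.take_succ_cons, ih]

-- ===== VERDICT (by name: the statement is the Claim_ definition above) =====
theorem split_numpy_doc_sections_py_spec : Claim_equal_split_numpy_doc_sections_py := by
  intro doc _
  unfold Spec_split_numpy_doc_sections_py split_numpy_doc_sections_py split_numpy_doc_sections_py_alt
  rw [pvTextB_eq]
  by_cases hE : (pvText doc).isEmpty
  · simp [hE]
  · simp only [hE, if_false, Bool.false_eq_true]
    set L := PySem.Str.splitlines (String.ofList (pvText doc)) with hL
    have hscan := pvAScan_eq (L := L) (i := 0) (Nat.zero_le _)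
    have hnxt0 : pvNxt L 0 = (pvHdrs L).headD L.length := by
      unfold pvNxt; rw [pvHsf_zero]
    have houter := pvAOuter_eq (L := L) (i := pvNxt L 0) (pvNxt_le _) PySem.Dict.empty
    rw [hscan]
    simp only
    rw [houter, pvHsf_nxt _, pvHsf_zero]
    rw [pvFold_eq, pvG_eq]
    simp [hnxt0]
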